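-- pv_equiv track=rewrite | github.com/showell/angry-gopher | games/lynrummy/python/beginner.py | almost_neighbors
-- ===== SOURCE A (Python) =====
-- RED = {1, 3}             # Diamonds, Hearts
--
-- def _succ(v):
--     return 1 if v == 13 else v + 1
--
-- def _color(s):
--     return "red" if s in RED else "black"
--
-- def almost_neighbors(c):
--     """Shapes 2 values away in a plausible run — same color as
--     `c`, since a run alternates colors and positions 2 apart
--     share a color. For 6C (black): {4C, 4S, 8C, 8S}."""
--     v, s, _ = c
--     c_color = _color(s)
--     def step_back(n, k):
--         for _ in range(k):
--             n = 13 if n == 1 else n - 1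
--         return n
--     def step_fwd(n, k):
--         for _ in range(k):
--             n = _succ(n)
--         return n
--     pred2 = step_back(v, 2)
--     succ2 = step_fwd(v, 2)
--     out = set()
--     for ss in range(4):
--         if _color(ss) == c_color:
--             out.add((pred2, ss))
--             out.add((succ2, ss))
--     return out
-- ===== SOURCE B (Python) =====
-- def almost_neighbors(c):
--     v, s, _ = c
--     pred2 = 12 if v == 1 else 13 if v == 2 else v - 2
--     succ2 = 1 if v == 12 else 2 if v == 13 else v + 2
--     suits = (1, 3) if s in (1, 3) else (0, 2)
--     return {(n, ss) for ss in suits for n in (pred2, succ2)}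
-- ===== Notes on version B (the rewrite author's own statement) =====
-- stated objective: simpler
-- what changed: Replaces the per-step wrap-around loops and the colour-filtered scan over all four suits by closed-form pred2/succ2 expressions and a direct choice of the two same-colour suits, built as a set comprehension with no loops or helpers.
import Mathlib
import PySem

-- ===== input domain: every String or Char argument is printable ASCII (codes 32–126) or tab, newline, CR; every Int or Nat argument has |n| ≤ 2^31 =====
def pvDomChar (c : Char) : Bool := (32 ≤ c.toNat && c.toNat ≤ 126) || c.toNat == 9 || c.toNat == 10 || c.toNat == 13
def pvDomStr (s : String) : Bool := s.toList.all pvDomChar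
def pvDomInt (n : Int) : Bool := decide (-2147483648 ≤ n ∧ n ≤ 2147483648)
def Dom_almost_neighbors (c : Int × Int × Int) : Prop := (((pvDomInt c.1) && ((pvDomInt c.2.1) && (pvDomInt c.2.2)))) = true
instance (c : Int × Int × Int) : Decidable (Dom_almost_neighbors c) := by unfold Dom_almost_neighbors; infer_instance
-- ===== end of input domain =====

-- B replaces the per-step wrap loops and the colour-filtered scan over all four
-- suits by closed-form pred2/succ2 expressions and a direct choice of the two
-- same-colour suits (objective: simpler).

-- ===== PORT A =====
def pySucc (v : Int) : Int := if v = 13 then 1 else v + 1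

def pyColor (s : Int) : String := if s = 1 ∨ s = 3 then "red" else "black"

def stepBack (n : Int) : Nat → Int
  | 0 => n
  | k + 1 => stepBack (if n = 1 then 13 else n - 1) k

def stepFwd (n : Int) : Nat → Int
  | 0 => n
  | k + 1 => stepFwd (pySucc n) k

def almost_neighbors (c : Int × Int × Int) : List (Int × Int) :=
  let v := c.1
  let s := c.2.1
  let cColor := pyColor s
  let pred2 := stepBack v 2
  let succ2 := stepFwd v 2
  (PySem.List.pyRange 0 4 1).foldl
    (fun out ss =>
      if pyColor ss = cColor then
        PySem.Set.add (PySem.Set.add out (pred2, ss)) (succ2, ss)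
      else out)
    PySem.Set.empty

-- ===== PORT B =====
def predTwo (v : Int) : Int := if v = 1 then 12 else if v = 2 then 13 else v - 2

def succTwo (v : Int) : Int := if v = 12 then 1 else if v = 13 then 2 else v + 2

def almost_neighbors_alt (c : Int × Int × Int) : List (Int × Int) :=
  let v := c.1
  let s := c.2.1
  let suits : List Int := if s = 1 ∨ s = 3 then [1, 3] else [0, 2]
  -- set comprehension {(n, ss) for ss in suits for n in (pred2, succ2)}
  suits.foldl
    (fun acc ss => PySem.Set.add (PySem.Set.add acc (predTwo v, ss)) (succTwo v, ss))
    PySem.Set.empty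

-- ===== PRECONDITION & SPEC =====
def Spec_almost_neighbors (c : Int × Int × Int) (out : List (Int × Int)) : Prop := out = almost_neighbors_alt c
instance (c : Int × Int × Int) (out : List (Int × Int)) : Decidable (Spec_almost_neighbors c out) := by unfold Spec_almost_neighbors; infer_instance

-- ===== CLAIM (what is proved, stated in full; the proofs are below) =====
def Claim_equal_almost_neighbors : Prop := ∀ (c : Int × Int × Int), Dom_almost_neighbors c → Spec_almost_neighbors c (almost_neighbors c)

-- ===== LEMMAS AND PROOFS =====
theorem stepBack_two (v : Int) : stepBack v 2 = predTwo v := by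
  simp only [stepBack, predTwo]
  split_ifs <;> omega

theorem stepFwd_two (v : Int) : stepFwd v 2 = succTwo v := by
  simp only [stepFwd, pySucc, succTwo]
  split_ifs <;> omega

-- ===== VERDICT (by name: the statement is the Claim_ definition above) =====
theorem almost_neighbors_spec : Claim_equal_almost_neighbors := by
  intro c _
  obtain ⟨v, s, t⟩ := c
  show almost_neighbors (v, s, t) = almost_neighbors_alt (v, s, t)
  simp only [almost_neighbors, almost_neighbors_alt, stepBack_two, stepFwd_two]
  by_cases h : s = 1 ∨ s = 3
  · simp [pyColor, h, PySem.List.pyRange_one, List.range_succ, PySem.Set.add,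
      PySem.Set.contains, PySem.Set.empty]
  · simp [pyColor, h, PySem.List.pyRange_one, List.range_succ, PySem.Set.add,
      PySem.Set.contains, PySem.Set.empty]
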